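-- pv_equiv track=rewrite | github.com/ottokus/projects | CS 2410_testcode6_clean.py | color_palette
-- ===== SOURCE A (Python) =====
-- def color_palette(label_order, check_1, check_2, check_3, check_4):
--     '''setting up the color palette for the boxplots.  Setting up the color so they are visually similar to
--     the colors on the label.  The exact colors used for the labels cannot be used here.  The color is either too dark/deep
--     or it is too intense that the median line is difficult to see.  Similar colors are chosen, and it is visually easier to line up the label with the
--     representative bar.
--
--     The arguments passed in this function are similar to those for the label_formatter function.  The
--     color order of the bars is the same order as the for the labels.
--
--     color code:
--     #00bfff (similar to BLUE) means it started above in unadjusted, and remained above in adjusted.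
--     LIGHT GREEN (similar to DARK GREEN) means it started below in unadjusted, and ended above in adjusted.
--     LIGHT CORAL (similar to DARK RED) means it started above in unadjusted, and ended below in adjusted.
--     SILVER (similar to BLACK) means it started below in unadjusted, and remained below in adjusted.
--
--     args:
--     label_order would be the order of the labels
--     check_1     Similar to c1 in the previous functions, Checking whether a city started ABOVE the raw median
--                 and moved ABOVE the normalized median.
--     check_2     Similar to c2 in the previous functions, Checking whether a city started LOW the raw median
--                 and moved ABOVE the normalized median.
--     check_3     Similar to c3 in the previous functions, Checking whether a city started ABOVE the raw median
--                 and moved BELOW the normalized median.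
--     check_4     Similar to c4 in the previous functions, Checking whether a city started BELOW the raw median
--                 and moved BELOW the normalized median.
--     returns:
--     list of the order of colors of bars in variable 'bar_colors'
--     '''
--
--     length = len(label_order)
--
--     # initialize list variable to hold the colors.  This will be used to assign a matching color to the bar to the label.
--     bar_colors = [None] * length
--
--     # Check to see if a state or city_name name appears, if so highlight.
--     # We are highlighting cities if they are above/below median in raw income and where they move above/below median in normalized income.
--     # We then set the bar color the same as the label color.
--     for i in range(length):
--         for a in range(len(check_1)):
--             if check_1[a] == label_order[i] : bar_colors[i] = '#00bfff'   #00bfff #70bbff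
--         for b in range(len(check_2)):
--             if check_2[b] == label_order[i]: bar_colors[i] = 'lightgreen'   #90e77d #cfe6ca
--         for c in range(len(check_3)):
--             if check_3[c] == label_order[i]: bar_colors[i] = 'lightcoral'    #f1bcb8
--         for d in range(len(check_4)):
--             if check_4[d] == label_order[i]: bar_colors[i] = 'silver'    #f2f2f2
--
--     return bar_colors
-- ===== SOURCE B (Python) =====
-- def color_palette(label_order, check_1, check_2, check_3, check_4):
--     color_map = {}
--     for x in check_1:
--         color_map[x] = '#00bfff'
--     for x in check_2:
--         color_map[x] = 'lightgreen'
--     for x in check_3: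
--         color_map[x] = 'lightcoral'
--     for x in check_4:
--         color_map[x] = 'silver'
--     return [color_map.get(lbl) for lbl in label_order]
-- ===== Notes on version B (the rewrite author's own statement) =====
-- stated objective: faster
-- what changed: Replaces A's per-label scan of all four check lists (quadratic nested loops) with a single dict built once from the four lists in priority order, then one O(1) lookup per label.
import Mathlib
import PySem

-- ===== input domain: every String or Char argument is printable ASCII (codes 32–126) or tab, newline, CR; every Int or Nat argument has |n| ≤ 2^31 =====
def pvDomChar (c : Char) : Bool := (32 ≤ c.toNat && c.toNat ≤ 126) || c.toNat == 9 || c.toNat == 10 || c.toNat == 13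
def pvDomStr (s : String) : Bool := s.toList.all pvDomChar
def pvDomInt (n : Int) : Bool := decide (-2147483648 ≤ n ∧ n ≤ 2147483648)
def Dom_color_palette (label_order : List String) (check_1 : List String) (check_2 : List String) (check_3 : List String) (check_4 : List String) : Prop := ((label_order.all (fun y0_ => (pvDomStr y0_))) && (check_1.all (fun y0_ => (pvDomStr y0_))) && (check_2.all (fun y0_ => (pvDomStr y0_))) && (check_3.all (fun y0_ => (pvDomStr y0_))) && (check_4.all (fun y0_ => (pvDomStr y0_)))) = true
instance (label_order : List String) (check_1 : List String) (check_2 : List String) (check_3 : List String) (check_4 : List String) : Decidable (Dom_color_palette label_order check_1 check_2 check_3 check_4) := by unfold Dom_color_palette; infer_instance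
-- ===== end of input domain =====

-- B replaces A's per-label scans of all four check lists with a dict built once (later lists overwrite earlier) plus one lookup per label: asymptotically fewer comparisons.


-- ===== PORT A =====
def color_palette (label_order : List String) (check_1 : List String) (check_2 : List String) (check_3 : List String) (check_4 : List String) : List (Option String) :=
  let length : Int := PySem.List.len label_order
  let bar_colors : List (Option String) := PySem.List.pyRepeat [none] length
  (PySem.List.pyRange 0 length 1).foldl (fun bar_colors i =>
    let bar_colors := (PySem.List.pyRange 0 (PySem.List.len check_1) 1).foldl
      (fun bc a => if PySem.List.pyGetD check_1 a "" == PySem.List.pyGetD label_order i "" then PySem.List.pySetD bc i (some "#00bfff") else bc) bar_colors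
    let bar_colors := (PySem.List.pyRange 0 (PySem.List.len check_2) 1).foldl
      (fun bc b => if PySem.List.pyGetD check_2 b "" == PySem.List.pyGetD label_order i "" then PySem.List.pySetD bc i (some "lightgreen") else bc) bar_colors
    let bar_colors := (PySem.List.pyRange 0 (PySem.List.len check_3) 1).foldl
      (fun bc c => if PySem.List.pyGetD check_3 c "" == PySem.List.pyGetD label_order i "" then PySem.List.pySetD bc i (some "lightcoral") else bc) bar_colors
    let bar_colors := (PySem.List.pyRange 0 (PySem.List.len check_4) 1).foldl
      (fun bc d => if PySem.List.pyGetD check_4 d "" == PySem.List.pyGetD label_order i "" then PySem.List.pySetD bc i (some "silver") else bc) bar_colors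
    bar_colors) bar_colors

-- ===== PORT B =====
def color_palette_alt (label_order : List String) (check_1 : List String) (check_2 : List String) (check_3 : List String) (check_4 : List String) : List (Option String) :=
  let color_map : PySem.Dict String String := PySem.Dict.empty
  let color_map := check_1.foldl (fun d x => d.insert x "#00bfff") color_map
  let color_map := check_2.foldl (fun d x => d.insert x "lightgreen") color_map
  let color_map := check_3.foldl (fun d x => d.insert x "lightcoral") color_map
  let color_map := check_4.foldl (fun d x => d.insert x "silver") color_map
  label_order.map (fun lbl => color_map.get? lbl)

-- ===== PRECONDITION & SPEC =====
def Spec_color_palette (label_order : List String) (check_1 : List String) (check_2 : List String) (check_3 : List String) (check_4 : List String) (out : List (Option String)) : Prop := out = color_palette_alt label_order check_1 check_2 check_3 check_4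
instance (label_order : List String) (check_1 : List String) (check_2 : List String) (check_3 : List String) (check_4 : List String) (out : List (Option String)) : Decidable (Spec_color_palette label_order check_1 check_2 check_3 check_4 out) := by unfold Spec_color_palette; infer_instance

-- ===== CLAIM (what is proved, stated in full; the proofs are below) =====
def Claim_equal_color_palette : Prop := ∀ (label_order : List String) (check_1 : List String) (check_2 : List String) (check_3 : List String) (check_4 : List String), Dom_color_palette label_order check_1 check_2 check_3 check_4 → Spec_color_palette label_order check_1 check_2 check_3 check_4 (color_palette label_order check_1 check_2 check_3 check_4)

-- ===== LEMMAS AND PROOFS =====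

-- the colour both programs assign to a label (priority: check_4 over check_3 over check_2 over check_1)
def pvColor (check_1 check_2 check_3 check_4 : List String) (l : String) : Option String :=
  if l ∈ check_4 then some "silver"
  else if l ∈ check_3 then some "lightcoral"
  else if l ∈ check_2 then some "lightgreen"
  else if l ∈ check_1 then some "#00bfff"
  else none

-- B side: lookup after a constant-value insert loop
theorem get?_foldl_insert_const (xs : List String) (v : String) (d : PySem.Dict String String) (l : String) :
    (xs.foldl (fun d x => d.insert x v) d).get? l = if l ∈ xs then some v else d.get? l := by
  induction xs generalizing d with
  | nil => simp
  | cons x xs ih =>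
      simp only [List.foldl_cons, ih, List.mem_cons, PySem.Dict.get?_insert]
      by_cases hx : l = x <;> by_cases hm : l ∈ xs <;> simp_all

theorem alt_eq_map (label_order check_1 check_2 check_3 check_4 : List String) :
    color_palette_alt label_order check_1 check_2 check_3 check_4
      = label_order.map (pvColor check_1 check_2 check_3 check_4) := by
  unfold color_palette_alt
  refine List.map_congr_left (fun l _ => ?_)
  simp only [get?_foldl_insert_const, pvColor, PySem.Dict.get?_empty]

-- A side, inner loop: one scan of one check list sets cell k (or leaves the list alone)
theorem foldl_setIf (c : List String) (l : String) (k : Nat) (w : Option String) (bc : List (Option String)) :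
    (c.foldl (fun bc x => if x == l then bc.set k w else bc) bc)
      = if l ∈ c then bc.set k w else bc := by
  induction c generalizing bc with
  | nil => simp
  | cons x xs ih =>
      simp only [List.foldl_cons, List.mem_cons]
      by_cases hx : x = l
      · simp only [hx, beq_self_eq_true, if_true, ih, List.set_set]
        by_cases hm : l ∈ xs <;> simp [hm]
      · have hx' : (x == l) = false := beq_false_of_ne hx
        simp only [hx', Bool.false_eq_true, if_false, ih]
        by_cases hm : l ∈ xs <;> simp [hm, Ne.symm hx]

theorem inner_eq (c : List String) (l : String) (v : String) (k : Nat) (bc : List (Option String)) :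
    ((PySem.List.pyRange 0 (PySem.List.len c) 1).foldl
      (fun bc a => if PySem.List.pyGetD c a "" == l then PySem.List.pySetD bc (k : Int) (some v) else bc) bc)
      = if l ∈ c then bc.set k (some v) else bc := by
  rw [PySem.List.foldl_pyRange_zero_pyGetD c ""
    (fun bc x => if x == l then PySem.List.pySetD bc (k : Int) (some v) else bc) bc]
  simp only [PySem.List.pySetD_natCast]
  exact foldl_setIf c l k (some v) bc

-- A side, body of the outer loop at index k
theorem step_eq (check_1 check_2 check_3 check_4 : List String) (l : String) (k : Nat)
    (bc : List (Option String)) :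
    ((PySem.List.pyRange 0 (PySem.List.len check_4) 1).foldl
      (fun bc d => if PySem.List.pyGetD check_4 d "" == l then PySem.List.pySetD bc (k : Int) (some "silver") else bc)
      ((PySem.List.pyRange 0 (PySem.List.len check_3) 1).foldl
        (fun bc c => if PySem.List.pyGetD check_3 c "" == l then PySem.List.pySetD bc (k : Int) (some "lightcoral") else bc)
        ((PySem.List.pyRange 0 (PySem.List.len check_2) 1).foldl
          (fun bc b => if PySem.List.pyGetD check_2 b "" == l then PySem.List.pySetD bc (k : Int) (some "lightgreen") else bc)
          ((PySem.List.pyRange 0 (PySem.List.len check_1) 1).foldl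
            (fun bc a => if PySem.List.pyGetD check_1 a "" == l then PySem.List.pySetD bc (k : Int) (some "#00bfff") else bc) bc))))
      = (match pvColor check_1 check_2 check_3 check_4 l with
          | some v => bc.set k (some v)
          | none => bc) := by
  simp only [inner_eq, pvColor]
  by_cases h4 : l ∈ check_4 <;> by_cases h3 : l ∈ check_3 <;>
    by_cases h2 : l ∈ check_2 <;> by_cases h1 : l ∈ check_1 <;>
    simp [h1, h2, h3, h4, List.set_set]

theorem outer_eq (label_order check_1 check_2 check_3 check_4 : List String) (m : Nat)
    (hm : m ≤ label_order.length) :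
    ((PySem.List.pyRange 0 (m : Int) 1).foldl (fun bar_colors i =>
      let bar_colors := (PySem.List.pyRange 0 (PySem.List.len check_1) 1).foldl
        (fun bc a => if PySem.List.pyGetD check_1 a "" == PySem.List.pyGetD label_order i "" then PySem.List.pySetD bc i (some "#00bfff") else bc) bar_colors
      let bar_colors := (PySem.List.pyRange 0 (PySem.List.len check_2) 1).foldl
        (fun bc b => if PySem.List.pyGetD check_2 b "" == PySem.List.pyGetD label_order i "" then PySem.List.pySetD bc i (some "lightgreen") else bc) bar_colors
      let bar_colors := (PySem.List.pyRange 0 (PySem.List.len check_3) 1).foldl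
        (fun bc c => if PySem.List.pyGetD check_3 c "" == PySem.List.pyGetD label_order i "" then PySem.List.pySetD bc i (some "lightcoral") else bc) bar_colors
      let bar_colors := (PySem.List.pyRange 0 (PySem.List.len check_4) 1).foldl
        (fun bc d => if PySem.List.pyGetD check_4 d "" == PySem.List.pyGetD label_order i "" then PySem.List.pySetD bc i (some "silver") else bc) bar_colors
      bar_colors) (List.replicate label_order.length none))
      = (label_order.take m).map (pvColor check_1 check_2 check_3 check_4)
          ++ List.replicate (label_order.length - m) none := by
  induction m with
  | zero => simp [PySem.List.pyRange_one_eq_nil]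
  | succ m ih =>
      have hm' : m ≤ label_order.length := Nat.le_of_succ_le hm
      have hlt : m < label_order.length := hm
      have hcast : ((m + 1 : Nat) : Int) = (m : Int) + 1 := by push_cast; ring
      rw [hcast, PySem.List.pyRange_one_succ_right (by positivity), List.foldl_append, ih hm']
      simp only [List.foldl_cons, List.foldl_nil]
      rw [step_eq check_1 check_2 check_3 check_4 (PySem.List.pyGetD label_order (m : Int) "") m]
      have hlab : PySem.List.pyGetD label_order (m : Int) "" = label_order[m] := by
        simp [PySem.List.pyGetD_natCast, List.getD_eq_getElem?_getD, List.getElem?_eq_getElem hlt]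
      have hrep : label_order.length - m = (label_order.length - (m + 1)) + 1 := by omega
      have htake : label_order.take (m + 1) = label_order.take m ++ [label_order[m]] := by
        rw [List.take_add_one, List.getElem?_eq_getElem hlt]; rfl
      rw [hlab, htake, List.map_append, List.map_singleton, hrep, List.replicate_succ]
      cases hgl : pvColor check_1 check_2 check_3 check_4 label_order[m] with
      | none => simp
      | some v => simp [Nat.min_eq_left hm']

-- ===== VERDICT (by name: the statement is the Claim_ definition above) =====
theorem color_palette_spec : Claim_equal_color_palette := by
  intro label_order check_1 check_2 check_3 check_4 _
  unfold Spec_color_palette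
  rw [alt_eq_map]
  unfold color_palette
  simp only [PySem.List.pyRepeat_singleton, PySem.List.len, Int.toNat_natCast]
  have h := outer_eq label_order check_1 check_2 check_3 check_4 label_order.length le_rfl
  simp only [PySem.List.len] at h
  rw [h]
  simp
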